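-- pv_equiv track=rewrite | github.com/Afeks214/Lorenzian-Educlidian- | src/testing/test_documentation_generator.py | _determine_test_type
-- ===== SOURCE A (Python) =====
-- from typing import Dict, List, Optional, Any, Tuple, Union
-- from enum import Enum
--
-- class TestType(Enum):
--     """Test type categories"""
--     UNIT = "unit"
--     INTEGRATION = "integration"
--     PERFORMANCE = "performance"
--     SECURITY = "security"
--     REGRESSION = "regression"
--     SMOKE = "smoke"
--     ACCEPTANCE = "acceptance"
--     STRESS = "stress"
--     LOAD = "load"
--     FUNCTIONAL = "functional"
--
-- def _determine_test_type(test_name: str, markers: List[str], dependencies: List[str]) -> str: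
--     """Determine test type based on name, markers, and dependencies"""
--     test_name_lower = test_name.lower()
--
--     # Check markers first
--     for marker in markers:
--         if marker in [t.value for t in TestType]:
--             return marker
--
--     # Check test name patterns
--     if any(word in test_name_lower for word in ['unit', 'isolated']):
--         return TestType.UNIT.value
--     elif any(word in test_name_lower for word in ['integration', 'e2e', 'end_to_end']):
--         return TestType.INTEGRATION.value
--     elif any(word in test_name_lower for word in ['performance', 'perf', 'benchmark']):
--         return TestType.PERFORMANCE.value
--     elif any(word in test_name_lower for word in ['security', 'auth', 'permission']):
--         return TestType.SECURITY.value
--     elif any(word in test_name_lower for word in ['regression', 'bug', 'fix']):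
--         return TestType.REGRESSION.value
--     elif any(word in test_name_lower for word in ['smoke', 'basic', 'sanity']):
--         return TestType.SMOKE.value
--     elif any(word in test_name_lower for word in ['acceptance', 'accept', 'user']):
--         return TestType.ACCEPTANCE.value
--     elif any(word in test_name_lower for word in ['stress', 'load', 'volume']):
--         return TestType.STRESS.value
--
--     # Default to functional if no specific type is identified
--     return TestType.FUNCTIONAL.value
-- ===== SOURCE B (Python) =====
-- from typing import List
--
-- _ENUM_VALUES = frozenset(["unit", "integration", "performance", "security", "regression",
--                           "smoke", "acceptance", "stress", "load", "functional"])
--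
-- _TYPES = ["unit", "integration", "performance", "security",
--           "regression", "smoke", "acceptance", "stress"]
--
-- # keyword -> priority rank (index into _TYPES); same keywords and priorities as A's ladder
-- _KEYWORDS = {
--     "unit": 0, "isolated": 0,
--     "integration": 1, "e2e": 1, "end_to_end": 1,
--     "performance": 2, "perf": 2, "benchmark": 2,
--     "security": 3, "auth": 3, "permission": 3,
--     "regression": 4, "bug": 4, "fix": 4,
--     "smoke": 5, "basic": 5, "sanity": 5,
--     "acceptance": 6, "accept": 6, "user": 6,
--     "stress": 7, "load": 7, "volume": 7,
-- }
--
-- def _determine_test_type(test_name: str, markers: List[str], dependencies: List[str]) -> str: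
--     hits = [m for m in markers if m in _ENUM_VALUES]
--     if hits:
--         return hits[0]
--     t = test_name.lower()
--     best = None
--     for w, p in _KEYWORDS.items():
--         if w in t:
--             best = p if best is None else min(best, p)
--     return _TYPES[best] if best is not None else "functional"
-- ===== Notes on version B (the rewrite author's own statement) =====
-- stated objective: alternative
-- what changed: Instead of A's early-exit if/elif ladder over keyword groups, B does one exhaustive pass over a flat keyword->priority map, accumulating the minimum matching priority and indexing a type table at the end (correct because the ladder returns the lowest-ranked group with a hit); the marker pass becomes filter-then-head against a precomputed frozenset instead of a returning loop that rebuilds the enum-value list on every iteration.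
import Mathlib
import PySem

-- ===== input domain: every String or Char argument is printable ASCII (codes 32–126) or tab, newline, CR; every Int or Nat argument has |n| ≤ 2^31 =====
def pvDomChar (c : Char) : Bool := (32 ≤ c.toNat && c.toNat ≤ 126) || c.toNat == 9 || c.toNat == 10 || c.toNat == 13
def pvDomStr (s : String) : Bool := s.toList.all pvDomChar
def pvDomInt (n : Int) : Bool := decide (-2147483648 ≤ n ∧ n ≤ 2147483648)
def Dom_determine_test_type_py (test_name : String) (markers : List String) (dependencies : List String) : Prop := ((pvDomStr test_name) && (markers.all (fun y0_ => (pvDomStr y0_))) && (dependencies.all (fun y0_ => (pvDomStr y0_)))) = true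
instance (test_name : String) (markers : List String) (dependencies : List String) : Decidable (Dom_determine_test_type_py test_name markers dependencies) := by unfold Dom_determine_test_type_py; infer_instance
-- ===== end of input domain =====

-- B replaces A's early-exit if/elif keyword ladder by one exhaustive pass over a flat
-- keyword→priority map accumulating the minimum matching priority (objective: alternative).
-- ===== PORT A =====
def pvEnumValues : List String :=
  ["unit", "integration", "performance", "security", "regression", "smoke", "acceptance", "stress", "load", "functional"]

-- the 'for marker in markers: if marker in [...] : return marker' loop
def pvMarkerLoopA : List String → Option String
  | [] => none
  | m :: rest => if pvEnumValues.contains m then some m else pvMarkerLoopA rest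

def determine_test_type_py (test_name : String) (markers : List String) (dependencies : List String) : String :=
  let t := PySem.Str.lower test_name
  match pvMarkerLoopA markers with
  | some m => m
  | none =>
    if (["unit", "isolated"] : List String).any (fun w => PySem.Str.isIn w t) then "unit"
    else if (["integration", "e2e", "end_to_end"] : List String).any (fun w => PySem.Str.isIn w t) then "integration"
    else if (["performance", "perf", "benchmark"] : List String).any (fun w => PySem.Str.isIn w t) then "performance"
    else if (["security", "auth", "permission"] : List String).any (fun w => PySem.Str.isIn w t) then "security"
    else if (["regression", "bug", "fix"] : List String).any (fun w => PySem.Str.isIn w t) then "regression"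
    else if (["smoke", "basic", "sanity"] : List String).any (fun w => PySem.Str.isIn w t) then "smoke"
    else if (["acceptance", "accept", "user"] : List String).any (fun w => PySem.Str.isIn w t) then "acceptance"
    else if (["stress", "load", "volume"] : List String).any (fun w => PySem.Str.isIn w t) then "stress"
    else "functional"

-- ===== PORT B =====
def pvTypesB : List String :=
  ["unit", "integration", "performance", "security", "regression", "smoke", "acceptance", "stress"]

-- the _KEYWORDS dict of Source B in insertion order
def pvKeywordsB : List (String × Nat) :=
  [("unit", 0), ("isolated", 0),
  ("integration", 1), ("e2e", 1), ("end_to_end", 1),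
  ("performance", 2), ("perf", 2), ("benchmark", 2),
  ("security", 3), ("auth", 3), ("permission", 3),
  ("regression", 4), ("bug", 4), ("fix", 4),
  ("smoke", 5), ("basic", 5), ("sanity", 5),
  ("acceptance", 6), ("accept", 6), ("user", 6),
  ("stress", 7), ("load", 7), ("volume", 7)]

-- the 'for w, p in _KEYWORDS.items(): if w in t: best = ...' accumulator loop
def pvBestFold (t : String) : List (String × Nat) → Option Nat → Option Nat
  | [], acc => acc
  | (w, p) :: rest, acc =>
      pvBestFold t rest
        (if PySem.Str.isIn w t then
          some (match acc with | none => p | some q => min q p)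
        else acc)

def determine_test_type_py_alt (test_name : String) (markers : List String) (dependencies : List String) : String :=
  match (markers.filter (fun m => pvEnumValues.contains m)).head? with
  | some m => m
  | none =>
    let t := PySem.Str.lower test_name
    match pvBestFold t pvKeywordsB none with
    | some b => pvTypesB.getD b ""
    | none => "functional"

-- ===== PRECONDITION & SPEC =====
def Spec_determine_test_type_py (test_name : String) (markers : List String) (dependencies : List String) (out : String) : Prop := out = determine_test_type_py_alt test_name markers dependencies
instance (test_name : String) (markers : List String) (dependencies : List String) (out : String) : Decidable (Spec_determine_test_type_py test_name markers dependencies out) := by unfold Spec_determine_test_type_py; infer_instance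

-- ===== CLAIM (what is proved, stated in full; the proofs are below) =====
def Claim_equal_determine_test_type_py : Prop := ∀ (test_name : String) (markers : List String) (dependencies : List String), Dom_determine_test_type_py test_name markers dependencies → Spec_determine_test_type_py test_name markers dependencies (determine_test_type_py test_name markers dependencies)

-- ===== LEMMAS AND PROOFS =====
theorem pvMarkerLoopA_eq_head_filter (ms : List String) :
    pvMarkerLoopA ms = (ms.filter (fun m => pvEnumValues.contains m)).head? := by
  induction ms with
  | nil => rfl
  | cons m rest ih =>
    cases h : pvEnumValues.contains m with
    | true => rw [pvMarkerLoopA, if_pos h, List.filter_cons_of_pos h, List.head?]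
    | false => rw [pvMarkerLoopA, if_neg (by simpa using h), List.filter_cons_of_neg (by simpa using h), ih]

def pvGrp (p : Nat) (ws : List String) : List (String × Nat) := ws.map (fun w => (w, p))

def pvMerge (acc : Option Nat) (p : Nat) : Option Nat :=
  some (match acc with | none => p | some q => min q p)

theorem pvKeywordsB_decomp : pvKeywordsB =
    pvGrp 0 ["unit", "isolated"] ++ (pvGrp 1 ["integration", "e2e", "end_to_end"] ++
    (pvGrp 2 ["performance", "perf", "benchmark"] ++ (pvGrp 3 ["security", "auth", "permission"] ++
    (pvGrp 4 ["regression", "bug", "fix"] ++ (pvGrp 5 ["smoke", "basic", "sanity"] ++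
    (pvGrp 6 ["acceptance", "accept", "user"] ++ pvGrp 7 ["stress", "load", "volume"])))))) := by rfl

theorem pvBestFold_append (t : String) (l1 l2 : List (String × Nat)) (acc : Option Nat) :
    pvBestFold t (l1 ++ l2) acc = pvBestFold t l2 (pvBestFold t l1 acc) := by
  induction l1 generalizing acc with
  | nil => rfl
  | cons x rest ih => obtain ⟨w, p⟩ := x; simp only [List.cons_append, pvBestFold]; exact ih _

theorem pvMerge_merge (acc : Option Nat) (p : Nat) : pvMerge (pvMerge acc p) p = pvMerge acc p := by
  cases acc <;> simp [pvMerge]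

theorem pvBestFold_group (t : String) (p : Nat) (ws : List String) (acc : Option Nat) :
    pvBestFold t (pvGrp p ws) acc =
      if ws.any (fun w => PySem.Str.isIn w t) then pvMerge acc p else acc := by
  induction ws generalizing acc with
  | nil => rfl
  | cons w ws ih =>
    simp only [pvGrp, List.map_cons, pvBestFold, List.any_cons]
    by_cases h : PySem.Str.isIn w t = true
    · rw [if_pos h]
      have e1 : (some (match acc with | none => p | some q => min q p)) = pvMerge acc p := rfl
      have e2 : List.map (fun w => (w, p)) ws = pvGrp p ws := rfl
      rw [e1, e2, ih]
      simp only [h, Bool.true_or, if_pos]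
      cases ws.any (fun w => PySem.Str.isIn w t) <;> simp [pvMerge_merge]
    · have hf : PySem.Str.isIn w t = false := by simpa using h
      rw [if_neg h]
      have e2 : List.map (fun w => (w, p)) ws = pvGrp p ws := rfl
      rw [e2, ih]
      simp only [hf, Bool.false_or]

theorem pvBestFold_stable (t : String) (ps : List (String × Nat)) (k : Nat)
    (h : ∀ x ∈ ps, k ≤ x.2) : pvBestFold t ps (some k) = some k := by
  induction ps with
  | nil => rfl
  | cons x rest ih =>
    obtain ⟨w, p⟩ := x
    have hk : k ≤ p := h (w, p) List.mem_cons_self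
    have : (if PySem.Str.isIn w t then
        some (match some k with | none => p | some q => min q p) else some k) = some k := by
      split <;> simp [Nat.min_eq_left hk]
    simp only [pvBestFold, this]
    exact ih (fun x hx => h x (List.mem_cons_of_mem _ hx))

theorem pvBestFold_stable' (t : String) (ps : List (String × Nat)) (k : Nat)
    (h : ∀ x ∈ ps, k ≤ x.2) : pvBestFold t ps (pvMerge none k) = some k :=
  pvBestFold_stable t ps k h

-- the keyword ladder of A equals B's min-accumulating pass over the flat keyword map
theorem pv_ladder_eq (t : String) :
    (if (["unit", "isolated"] : List String).any (fun w => PySem.Str.isIn w t) then "unit"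
    else if (["integration", "e2e", "end_to_end"] : List String).any (fun w => PySem.Str.isIn w t) then "integration"
    else if (["performance", "perf", "benchmark"] : List String).any (fun w => PySem.Str.isIn w t) then "performance"
    else if (["security", "auth", "permission"] : List String).any (fun w => PySem.Str.isIn w t) then "security"
    else if (["regression", "bug", "fix"] : List String).any (fun w => PySem.Str.isIn w t) then "regression"
    else if (["smoke", "basic", "sanity"] : List String).any (fun w => PySem.Str.isIn w t) then "smoke"
    else if (["acceptance", "accept", "user"] : List String).any (fun w => PySem.Str.isIn w t) then "acceptance"
    else if (["stress", "load", "volume"] : List String).any (fun w => PySem.Str.isIn w t) then "stress"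
    else "functional") =
    (match pvBestFold t pvKeywordsB none with
    | some b => pvTypesB.getD b ""
    | none => "functional") := by
  rw [pvKeywordsB_decomp, pvBestFold_append, pvBestFold_group t 0 ["unit", "isolated"] none]
  by_cases h1 : ((["unit", "isolated"] : List String).any (fun w => PySem.Str.isIn w t) = true)
  · rw [if_pos h1, if_pos h1, pvBestFold_stable' t (pvGrp 1 ["integration", "e2e", "end_to_end"] ++ (pvGrp 2 ["performance", "perf", "benchmark"] ++ (pvGrp 3 ["security", "auth", "permission"] ++ (pvGrp 4 ["regression", "bug", "fix"] ++ (pvGrp 5 ["smoke", "basic", "sanity"] ++ (pvGrp 6 ["acceptance", "accept", "user"] ++ (pvGrp 7 ["stress", "load", "volume"]))))))) 0 (by decide)]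
    rfl
  · rw [if_neg h1, if_neg h1]
    rw [pvBestFold_append, pvBestFold_group t 1 ["integration", "e2e", "end_to_end"] none]
    by_cases h2 : ((["integration", "e2e", "end_to_end"] : List String).any (fun w => PySem.Str.isIn w t) = true)
    · rw [if_pos h2, if_pos h2, pvBestFold_stable' t (pvGrp 2 ["performance", "perf", "benchmark"] ++ (pvGrp 3 ["security", "auth", "permission"] ++ (pvGrp 4 ["regression", "bug", "fix"] ++ (pvGrp 5 ["smoke", "basic", "sanity"] ++ (pvGrp 6 ["acceptance", "accept", "user"] ++ (pvGrp 7 ["stress", "load", "volume"])))))) 1 (by decide)]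
      rfl
    · rw [if_neg h2, if_neg h2]
      rw [pvBestFold_append, pvBestFold_group t 2 ["performance", "perf", "benchmark"] none]
      by_cases h3 : ((["performance", "perf", "benchmark"] : List String).any (fun w => PySem.Str.isIn w t) = true)
      · rw [if_pos h3, if_pos h3, pvBestFold_stable' t (pvGrp 3 ["security", "auth", "permission"] ++ (pvGrp 4 ["regression", "bug", "fix"] ++ (pvGrp 5 ["smoke", "basic", "sanity"] ++ (pvGrp 6 ["acceptance", "accept", "user"] ++ (pvGrp 7 ["stress", "load", "volume"]))))) 2 (by decide)]
        rfl
      · rw [if_neg h3, if_neg h3]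
        rw [pvBestFold_append, pvBestFold_group t 3 ["security", "auth", "permission"] none]
        by_cases h4 : ((["security", "auth", "permission"] : List String).any (fun w => PySem.Str.isIn w t) = true)
        · rw [if_pos h4, if_pos h4, pvBestFold_stable' t (pvGrp 4 ["regression", "bug", "fix"] ++ (pvGrp 5 ["smoke", "basic", "sanity"] ++ (pvGrp 6 ["acceptance", "accept", "user"] ++ (pvGrp 7 ["stress", "load", "volume"])))) 3 (by decide)]
          rfl
        · rw [if_neg h4, if_neg h4]
          rw [pvBestFold_append, pvBestFold_group t 4 ["regression", "bug", "fix"] none]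
          by_cases h5 : ((["regression", "bug", "fix"] : List String).any (fun w => PySem.Str.isIn w t) = true)
          · rw [if_pos h5, if_pos h5, pvBestFold_stable' t (pvGrp 5 ["smoke", "basic", "sanity"] ++ (pvGrp 6 ["acceptance", "accept", "user"] ++ (pvGrp 7 ["stress", "load", "volume"]))) 4 (by decide)]
            rfl
          · rw [if_neg h5, if_neg h5]
            rw [pvBestFold_append, pvBestFold_group t 5 ["smoke", "basic", "sanity"] none]
            by_cases h6 : ((["smoke", "basic", "sanity"] : List String).any (fun w => PySem.Str.isIn w t) = true)
            · rw [if_pos h6, if_pos h6, pvBestFold_stable' t (pvGrp 6 ["acceptance", "accept", "user"] ++ (pvGrp 7 ["stress", "load", "volume"])) 5 (by decide)]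
              rfl
            · rw [if_neg h6, if_neg h6]
              rw [pvBestFold_append, pvBestFold_group t 6 ["acceptance", "accept", "user"] none]
              by_cases h7 : ((["acceptance", "accept", "user"] : List String).any (fun w => PySem.Str.isIn w t) = true)
              · rw [if_pos h7, if_pos h7, pvBestFold_stable' t (pvGrp 7 ["stress", "load", "volume"]) 6 (by decide)]
                rfl
              · rw [if_neg h7, if_neg h7]
                rw [pvBestFold_group t 7 ["stress", "load", "volume"] none]
                by_cases h8 : ((["stress", "load", "volume"] : List String).any (fun w => PySem.Str.isIn w t) = true)
                · rw [if_pos h8, if_pos h8]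
                  rfl
                · rw [if_neg h8, if_neg h8]

-- ===== VERDICT (by name: the statement is the Claim_ definition above) =====
theorem determine_test_type_py_spec : Claim_equal_determine_test_type_py := by
  intro test_name markers dependencies _
  unfold Spec_determine_test_type_py determine_test_type_py determine_test_type_py_alt
  rw [pvMarkerLoopA_eq_head_filter]
  cases (markers.filter (fun m => pvEnumValues.contains m)).head? with
  | some m => rfl
  | none => exact pv_ladder_eq (PySem.Str.lower test_name)
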